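-- pv_equiv track=rewrite | github.com/FriedrichF/TheoInf | Uebung4-z3.py | ListAppendElement
-- ===== SOURCE A (Python) =====
-- def ListAppendElement(l,e):
--   if(l > 1):
--     if ((binTestBit(l, binLength(l)) == 1) and (binTestBit(l, binLength((l-1))) == 0)): #Testen ob es sich um eine Liste handelt
--       binNew = 0
--       binTmp = 0
--       binRet = l
--       length = binLength(e) #Laenge des uebergeben Zeichens
--       for i in range(0,length): #Jedes Zeichen durchlaufen
--         binTmp = binTestBit(e,(length - i)) #Ueberpruefen um welches Zeichen es sich handelt
--         if (binTmp == 1): #Wenn Zeichen eine 1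
--           binNew = (prodZ(binNew,4) + 3) #1 verdoppeln
--         else: #Wenn Zeichen 0
--           binNew = prodZ(binNew,4) #Zahl um 2 Stellen verschieben
--       lengthNew = (binLength(binNew) + 2) #Laenge der Zahl mit Trennzeichen
--       if (binNew == 0):
--         lengthNew = 4 #Wenn die Uebergebene Zahl eine 0 ist Laenge auf 4 setzen
--       binNew = (prodZ(binNew,4) + 2) #Trennzeichen hinzufuegen
--       for x in range(0,lengthNew):
--         binRet = prodZ(2,binRet) #Liste um laenge der Zahl nach links verschieben
--       ret = (binRet + binNew) #Neue Zahl aufaddieren und zurueckgeben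
--     else:
--       ret = -1
--   else:
--     ret = -1
--   return ret
--
-- def prodZ(x,y):
--   [i,z] = [0,0] # Initialisierung
--   if (x < 0):
--     x = (0 - x) # negatives Vorzeichen von x entfernen
--     y = (0 - y) # und auf y übertragen
--   for i in range(0,x): # x Schleifendurchläufe
--     z = (z + y) # y wird x-mal zu z addiert
--   return z
--
-- def divtwo(x): #Zahl durch 2 Teilen
--   z = 0
--   if (x <= 0):
--     z = 0
--   if (x > 0):
--     while (x >= 2):
--       z = (z + 1)
--       x = (x - 2)
--   return z
--
-- def binTestBit(n,stelle): #Gebe Bit an bestimmter Stelle zurueck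
--   ret = 0
--   iStelle = 0
--   if (n <= 0):
--     ret = 0
--   while ((n > 0) and (stelle > iStelle)):
--     iStelle = (iStelle + 1)
--     p = 0
--     zahl = divtwo(n)
--     for i in range(0, zahl):
--       p = (p + 2)
--     ret = (n - p)
--     n = zahl
--   return ret
--
-- def binLength(n): #Anzahl an Bits zurueck geben
--   ret = 0
--   iStelle = 0
--   if (n < 0):
--     iStelle = 0
--   if (n == 0):
--     iStelle = 1
--   while (n > 0):
--     iStelle = (iStelle + 1)
--     n = divtwo(n)
--   return iStelle
-- ===== SOURCE B (Python) =====
-- def ListAppendElement(l, e):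
--     if l > 1 and l == 1 << (l.bit_length() - 1):
--         spread = 0
--         weight = 1
--         n = e
--         while n > 0:
--             spread += (n & 1) * weight
--             weight *= 4
--             n >>= 1
--         binNew = 3 * spread
--         lengthNew = 4 if binNew == 0 else binNew.bit_length() + 2
--         return (l << lengthNew) + binNew * 4 + 2
--     return -1
-- ===== Notes on version B (the rewrite author's own statement) =====
-- stated objective: faster
-- what changed: B tests the list marker with l == 1 << (l.bit_length()-1) and encodes e by one LSB-first halving loop with a positional weight (spread = sum of bit_i*4^i, binNew = 3*spread), replacing A's MSB-first scan that calls the bit-test/bit-length helpers per position and does all arithmetic by repeated addition (prodZ).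
import Mathlib
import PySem

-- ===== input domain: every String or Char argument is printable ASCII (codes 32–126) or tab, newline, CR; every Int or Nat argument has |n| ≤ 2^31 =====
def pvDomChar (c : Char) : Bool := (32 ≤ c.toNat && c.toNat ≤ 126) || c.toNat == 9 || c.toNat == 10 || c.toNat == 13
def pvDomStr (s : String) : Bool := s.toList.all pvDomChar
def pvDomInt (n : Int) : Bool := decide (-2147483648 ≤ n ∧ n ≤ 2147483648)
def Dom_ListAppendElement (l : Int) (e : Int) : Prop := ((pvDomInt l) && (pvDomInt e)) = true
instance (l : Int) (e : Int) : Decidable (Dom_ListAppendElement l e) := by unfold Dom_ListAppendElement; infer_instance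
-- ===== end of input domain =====

-- B replaces A's MSB-first bit-test scan (with repeated-addition arithmetic) by one LSB-first
-- halving loop with a positional weight plus Python's bit_length; measurably faster (A's prodZ
-- loops Θ(value) times).

-- ===== PORT A =====
def prodZ (x : Int) (y : Int) : Int :=
  let xy := if x < 0 then (0 - x, 0 - y) else (x, y)
  (List.range xy.1.toNat).foldl (fun z _ => z + xy.2) 0

def divtwoLoop (x : Int) (z : Int) : Int :=
  if 2 ≤ x then divtwoLoop (x - 2) (z + 1) else z
  termination_by x.toNat
  decreasing_by omega

def divtwo (x : Int) : Int :=
  if 0 < x then divtwoLoop x 0 else 0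

-- the two lemmas the ports below cite for termination
theorem divtwoLoop_eq (x z : Int) (hx : 0 ≤ x) : divtwoLoop x z = z + x / 2 := by
  induction x, z using divtwoLoop.induct with
  | case1 x z h ih => unfold divtwoLoop; rw [if_pos h, ih (by omega)]; omega
  | case2 x z h => unfold divtwoLoop; rw [if_neg h]; omega

theorem divtwo_toNat_lt (n : Int) (h : 0 < n) : (divtwo n).toNat < n.toNat := by
  unfold divtwo; rw [if_pos h, divtwoLoop_eq _ _ (by omega)]; omega

def binTestBitLoop (n : Int) (stelle : Int) (iStelle : Int) (ret : Int) : Int :=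
  if 0 < n ∧ iStelle < stelle then
    -- zahl := divtwo n; p := its doubling loop (temporaries inlined)
    binTestBitLoop (divtwo n) stelle (iStelle + 1)
      (n - (List.range (divtwo n).toNat).foldl (fun p _ => p + 2) 0)
  else ret
  termination_by (stelle - iStelle).toNat
  decreasing_by omega

def binTestBit (n : Int) (stelle : Int) : Int := binTestBitLoop n stelle 0 0

def binLengthLoop (n : Int) (iStelle : Int) : Int :=
  if h : 0 < n then binLengthLoop (divtwo n) (iStelle + 1) else iStelle
  termination_by n.toNat
  decreasing_by exact divtwo_toNat_lt n h

def binLength (n : Int) : Int :=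
  let iStelle : Int := 0
  let iStelle := if n < 0 then 0 else iStelle
  let iStelle := if n = 0 then 1 else iStelle
  binLengthLoop n iStelle

def ListAppendElement (l : Int) (e : Int) : Int :=
  if 1 < l then
    if binTestBit l (binLength l) = 1 ∧ binTestBit l (binLength (l - 1)) = 0 then
      let binRet := l
      let length := binLength e
      let binNew := (List.range length.toNat).foldl
        (fun (binNew : Int) (i : Nat) =>
          if binTestBit e (length - (i : Int)) = 1 then prodZ binNew 4 + 3
          else prodZ binNew 4) 0
      let lengthNew := binLength binNew + 2
      let lengthNew := if binNew = 0 then 4 else lengthNew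
      let binNew := prodZ binNew 4 + 2
      let binRet := (List.range lengthNew.toNat).foldl (fun binRet _ => prodZ 2 binRet) binRet
      binRet + binNew
    else (-1)
  else (-1)

-- ===== PORT B =====
def spreadLoop (n : Int) (weight : Int) (spread : Int) : Int :=
  if 0 < n then
    spreadLoop (n >>> (1 : Nat)) (weight * 4) (spread + PySem.Int.band n 1 * weight)
  else spread
  termination_by n.toNat
  decreasing_by simp only [Int.shiftRight_eq_div_pow, pow_one]; omega

def ListAppendElement_alt (l : Int) (e : Int) : Int :=
  if 1 < l ∧ l = 1 <<< (PySem.Int.bitLength l - 1) then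
    let binNew := 3 * spreadLoop e 1 0
    let lengthNew : Int := if binNew = 0 then 4 else (PySem.Int.bitLength binNew : Int) + 2
    l <<< lengthNew.toNat + binNew * 4 + 2
  else (-1)

-- ===== PRECONDITION & SPEC =====
def Spec_ListAppendElement (l : Int) (e : Int) (out : Int) : Prop := out = ListAppendElement_alt l e
instance (l : Int) (e : Int) (out : Int) : Decidable (Spec_ListAppendElement l e out) := by unfold Spec_ListAppendElement; infer_instance

-- ===== CLAIM (what is proved, stated in full; the proofs are below) =====
def Claim_equal_ListAppendElement : Prop := ∀ (l : Int) (e : Int), Dom_ListAppendElement l e → Spec_ListAppendElement l e (ListAppendElement l e)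

-- ===== LEMMAS AND PROOFS =====

theorem foldl_add_const (k : Nat) (y z : Int) :
    (List.range k).foldl (fun a _ => a + y) z = z + k * y := by
  rw [PySem.List.foldl_add]; simp [mul_comm]

theorem prodZ_eq (x y : Int) : prodZ x y = x * y := by
  unfold prodZ
  split_ifs with h
  · rw [foldl_add_const]
    have : ((0 - x).toNat : Int) = -x := by omega
    rw [this]; ring
  · rw [foldl_add_const]
    have : (x.toNat : Int) = x := by omega
    rw [this]; ring

theorem divtwo_eq (x : Int) (hx : 0 ≤ x) : divtwo x = x / 2 := by
  unfold divtwo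
  split_ifs with h
  · rw [divtwoLoop_eq _ _ (by omega)]; ring
  · omega

theorem binLengthLoop_eq (n i : Int) (hn : 0 ≤ n) :
    binLengthLoop n i = i + (PySem.Int.bitLength n : Int) := by
  induction n, i using binLengthLoop.induct with
  | case1 n i h ih =>
    unfold binLengthLoop; rw [dif_pos h]
    have hd : divtwo n = n / 2 := divtwo_eq n (by omega)
    rw [ih (by rw [hd]; omega)]
    rw [PySem.Int.bitLength_of_pos h, PySem.Int.floordiv_eq_ediv_of_pos (by norm_num), hd]
    push_cast; ring
  | case2 n i h =>
    unfold binLengthLoop; rw [dif_neg h]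
    have : n = 0 := by omega
    subst this; simp

theorem binLength_pos (n : Int) (h : 0 < n) : binLength n = (PySem.Int.bitLength n : Int) := by
  unfold binLength
  simp only [if_neg (by omega : ¬ n < 0), if_neg (by omega : ¬ n = 0)]
  rw [binLengthLoop_eq n 0 (by omega)]; ring

theorem binLength_neg (n : Int) (h : n < 0) : binLength n = 0 := by
  have h1 : ¬ (0:Int) < n := by omega
  have h2 : n ≠ 0 := by omega
  unfold binLength binLengthLoop
  simp [h, h1, h2]

theorem binLength_zero : binLength 0 = 1 := by
  unfold binLength binLengthLoop; simp

-- characterization of A's bit-test loop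
theorem btbLoop_char (n s i r : Int) (h1 : 0 < n) (h2 : i < s)
    (h3 : (s - i).toNat ≤ PySem.Int.bitLength n) :
    binTestBitLoop n s i r = n / 2 ^ ((s - i).toNat - 1) % 2 := by
  induction n, i, r using binTestBitLoop.induct (stelle := s) with
  | case1 n i r h ih =>
    have hd : divtwo n = n / 2 := divtwo_eq n (by omega)
    have hp : (List.range (divtwo n).toNat).foldl (fun p _ => p + 2) 0 = 2 * (n / 2) := by
      rw [foldl_add_const, hd]; omega
    unfold binTestBitLoop; rw [if_pos h]
    by_cases hs1 : s - i = 1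
    · have hstop : ¬ (0 < divtwo n ∧ i + 1 < s) := by
        rintro ⟨-, hc⟩; omega
      unfold binTestBitLoop; rw [if_neg hstop, hp]
      have : (s - i).toNat - 1 = 0 := by omega
      rw [this, pow_zero, Int.ediv_one]; omega
    · have hs2 : 2 ≤ s - i := by omega
      have hBL2 : 2 ≤ PySem.Int.bitLength n := by omega
      have hn2 : 2 ≤ n := by
        by_contra hc
        have hn1 : n = 1 := by omega
        rw [hn1] at hBL2
        have : PySem.Int.bitLength (1 : Int) = 1 := by decide
        omega
      have hdpos : 0 < divtwo n := by rw [hd]; omega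
      have hbl : PySem.Int.bitLength (divtwo n) = PySem.Int.bitLength n - 1 := by
        have := PySem.Int.bitLength_of_pos h.1
        rw [PySem.Int.floordiv_eq_ediv_of_pos (by norm_num)] at this
        rw [hd]; omega
      rw [ih hdpos (by omega) (by rw [hbl]; omega), hd]
      have hexp : (s - (i + 1)).toNat - 1 = (s - i).toNat - 2 := by omega
      rw [hexp, Int.ediv_ediv_of_nonneg (by norm_num : (0:Int) ≤ 2), ← pow_succ']
      have : (s - i).toNat - 2 + 1 = (s - i).toNat - 1 := by omega
      rw [this]
  | case2 n i r h => exact absurd ⟨h1, h2⟩ h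

theorem btb_char (n : Int) (hn : 0 < n) (s : Int) (h1 : 0 < s)
    (h2 : s.toNat ≤ PySem.Int.bitLength n) :
    binTestBit n s = n / 2 ^ (s.toNat - 1) % 2 := by
  unfold binTestBit
  have h3 : (s - 0).toNat ≤ PySem.Int.bitLength n := by simpa using h2
  have := btbLoop_char n s 0 0 hn (by omega) h3
  simpa using this

-- bitLength bounds as Int facts (n > 0)
theorem bl_bounds (n : Int) (hn : 0 < n) :
    ((2 : Int) ^ (PySem.Int.bitLength n - 1) ≤ n) ∧ n < 2 ^ PySem.Int.bitLength n := by
  have h1 := PySem.Int.two_pow_bitLength_le n (by omega)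
  have h2 := PySem.Int.lt_two_pow_bitLength n
  have hna : (n.natAbs : Int) = n := by omega
  constructor
  · calc ((2:Int) ^ (PySem.Int.bitLength n - 1)) = ((2 ^ (PySem.Int.bitLength n - 1) : Nat) : Int) := by push_cast; ring
      _ ≤ (n.natAbs : Int) := by exact_mod_cast h1
      _ = n := hna
  · calc n = (n.natAbs : Int) := hna.symm
      _ < ((2 ^ PySem.Int.bitLength n : Nat) : Int) := by exact_mod_cast h2
      _ = 2 ^ PySem.Int.bitLength n := by push_cast; ring

theorem bl_unique (n : Int) (k : Nat) (hk : 0 < k)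
    (hlo : (2 : Int) ^ (k - 1) ≤ n) (hhi : n < 2 ^ k) : PySem.Int.bitLength n = k := by
  have hn : 0 < n := lt_of_lt_of_le (by positivity) hlo
  obtain ⟨b1, b2⟩ := bl_bounds n hn
  set m := PySem.Int.bitLength n with hm
  by_contra hne
  rcases Nat.lt_or_ge m k with hlt | hge
  · have : (2:Int) ^ m ≤ 2 ^ (k - 1) := by
      apply pow_le_pow_right₀ (by norm_num); omega
    linarith
  · have hkm : k < m := by omega
    have : (2:Int) ^ k ≤ 2 ^ (m - 1) := by
      apply pow_le_pow_right₀ (by norm_num); omega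
    linarith

theorem bl_ge_two (l : Int) (hl : 1 < l) : 2 ≤ PySem.Int.bitLength l := by
  obtain ⟨-, b2⟩ := bl_bounds l (by omega)
  by_contra h
  have : PySem.Int.bitLength l ≤ 1 := by omega
  have : (2:Int) ^ PySem.Int.bitLength l ≤ 2 ^ 1 := pow_le_pow_right₀ (by norm_num) this
  simp at this; omega

-- proof-side closed form of the bit spreading (binary digits read as base-4 digits)
def Sfun (n : Int) : Int :=
  if 0 < n then n % 2 + 4 * Sfun (n / 2) else 0
  termination_by n.toNat
  decreasing_by omega

theorem Sfun_eq_pos (n : Int) (h : 0 < n) : Sfun n = n % 2 + 4 * Sfun (n / 2) := by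
  conv_lhs => unfold Sfun
  rw [if_pos h]

theorem Sfun_pos (n : Int) (h : 0 < n) : 0 < Sfun n := by
  induction n using Sfun.induct with
  | case1 n hn ih =>
    unfold Sfun; rw [if_pos hn]
    by_cases h2 : 2 ≤ n
    · have := ih (by omega); omega
    · have : n = 1 := by omega
      subst this
      have h0 : Sfun (0:Int) = 0 := by unfold Sfun; norm_num
      norm_num [h0]
  | case2 n hn => omega

theorem spreadLoop_eq (n w s : Int) : spreadLoop n w s = s + w * Sfun n := by
  induction n, w, s using spreadLoop.induct with
  | case1 n w s h ih =>
    have h1 : n >>> (1 : Nat) = n / 2 := by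
      rw [Int.shiftRight_eq_div_pow]; norm_num
    have h2 : PySem.Int.band n 1 = n % 2 := by
      rw [PySem.Int.band_one, PySem.Int.mod_eq_emod_of_pos (by norm_num)]
    unfold spreadLoop; rw [if_pos h, ih, h1, h2, Sfun_eq_pos n h]
    ring
  | case2 n w s h =>
    unfold spreadLoop; rw [if_neg h]
    unfold Sfun; rw [if_neg h]; ring

-- A's MSB-first fold equals 3 * Sfun of the processed prefix
theorem afold (e : Int) (he : 0 < e) (j : Nat) (hj : j ≤ PySem.Int.bitLength e) :
    (List.range j).foldl
      (fun (binNew : Int) (i : Nat) =>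
        if binTestBit e ((PySem.Int.bitLength e : Int) - (i : Int)) = 1 then prodZ binNew 4 + 3
        else prodZ binNew 4) 0
      = 3 * Sfun (e / 2 ^ (PySem.Int.bitLength e - j)) := by
  induction j with
  | zero =>
    rw [List.range_zero, List.foldl_nil, Nat.sub_zero]
    have hz : e / 2 ^ PySem.Int.bitLength e = 0 :=
      Int.ediv_eq_zero_of_lt (by omega) (bl_bounds e he).2
    have hs0 : Sfun 0 = 0 := by unfold Sfun; norm_num
    rw [hz, hs0]; ring
  | succ j ih =>
    have hjm : j < PySem.Int.bitLength e := by omega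
    rw [List.range_succ, List.foldl_append, ih (by omega), List.foldl_cons, List.foldl_nil]
    have hcast : ((PySem.Int.bitLength e : Int) - (j : Int)).toNat = PySem.Int.bitLength e - j := by
      omega
    rw [btb_char e he ((PySem.Int.bitLength e : Int) - (j : Int)) (by omega)
      (by rw [hcast]; omega), hcast]
    have hexp : PySem.Int.bitLength e - j - 1 = PySem.Int.bitLength e - (j + 1) := by omega
    rw [hexp]
    have hqt : (2 : Int) ^ (PySem.Int.bitLength e - (j + 1)) ≤ e := by
      calc (2 : Int) ^ (PySem.Int.bitLength e - (j + 1)) ≤ 2 ^ (PySem.Int.bitLength e - 1) := by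
            apply pow_le_pow_right₀ (by norm_num); omega
        _ ≤ e := (bl_bounds e he).1
    have hone : (1 : Int) ≤ e / 2 ^ (PySem.Int.bitLength e - (j + 1)) :=
      (Int.le_ediv_iff_mul_le (by positivity : (0:Int) < 2 ^ (PySem.Int.bitLength e - (j + 1)))).mpr
        (by linarith)
    have hqpos : 0 < e / 2 ^ (PySem.Int.bitLength e - (j + 1)) := by omega
    have hstep : e / 2 ^ (PySem.Int.bitLength e - j)
        = e / 2 ^ (PySem.Int.bitLength e - (j + 1)) / 2 := by
      rw [Int.ediv_ediv_of_nonneg (by positivity : (0:Int) ≤ 2 ^ (PySem.Int.bitLength e - (j + 1))),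
        ← pow_succ]
      congr 2; omega
    rw [hstep]
    have hSq := Sfun_eq_pos _ hqpos
    have h01 : e / 2 ^ (PySem.Int.bitLength e - (j + 1)) % 2 = 0
        ∨ e / 2 ^ (PySem.Int.bitLength e - (j + 1)) % 2 = 1 := by omega
    rcases h01 with h0 | h1
    · rw [if_neg (by omega), prodZ_eq, hSq, h0]; ring
    · rw [if_pos h1, prodZ_eq, hSq, h1]; ring

theorem dfold (k : Nat) (a : Int) :
    (List.range k).foldl (fun r _ => prodZ 2 r) a = 2 ^ k * a := by
  induction k with
  | zero => simp
  | succ k ih => rw [List.range_succ, List.foldl_append, ih]; simp [prodZ_eq, pow_succ]; ring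

theorem guard_iff (l : Int) (hl : 1 < l) :
    (binTestBit l (binLength l) = 1 ∧ binTestBit l (binLength (l - 1)) = 0) ↔
      l = 1 <<< (PySem.Int.bitLength l - 1) := by
  obtain ⟨b1, b2⟩ := bl_bounds l (by omega)
  have hm2 : 2 ≤ PySem.Int.bitLength l := bl_ge_two l hl
  set m := PySem.Int.bitLength l with hm
  have hpow : (2 : Int) ^ m = 2 ^ (m - 1) * 2 := by
    rw [← pow_succ]; congr 1; omega
  have hshift : ((1 <<< (m - 1) : Nat) : Int) = 2 ^ (m - 1) := by
    rw [Nat.shiftLeft_eq]; push_cast; ring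
  have hbl1 : binLength l = (m : Int) := binLength_pos l (by omega)
  have hq1 : l / 2 ^ (m - 1) = 1 := by
    have h : PySem.Int.floordiv l (2 ^ (m - 1)) = 1 := by
      rw [PySem.Int.floordiv_eq_iff_of_pos (by positivity : (0:Int) < 2 ^ (m - 1))]
      constructor <;> linarith
    rw [PySem.Int.floordiv_eq_ediv_of_pos (by positivity : (0:Int) < 2 ^ (m - 1))] at h
    exact h
  have hfirst : binTestBit l (binLength l) = 1 := by
    rw [hbl1, btb_char l (by omega) (m : Int) (by omega) (by omega)]
    rw [show (m : Int).toNat - 1 = m - 1 from by omega, hq1]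
    decide
  rw [hshift]
  constructor
  · rintro ⟨-, hsecond⟩
    by_contra hne
    have hlt : 2 ^ (m - 1) < l := lt_of_le_of_ne b1 (fun hc => hne hc.symm)
    have hbl' : PySem.Int.bitLength (l - 1) = m := by
      apply bl_unique (l - 1) m (by omega) (by omega) (by omega)
    rw [binLength_pos (l - 1) (by omega), hbl',
      btb_char l (by omega) (m : Int) (by omega) (by omega)] at hsecond
    rw [show (m : Int).toNat - 1 = m - 1 from by omega, hq1] at hsecond
    norm_num at hsecond
  · intro hpw
    refine ⟨hfirst, ?_⟩
    have hpow2 : (2 : Int) ^ (m - 1) = 2 ^ (m - 2) * 2 := by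
      rw [← pow_succ]; congr 1; omega
    have hlow : (2 : Int) ^ (m - 2) ≤ l - 1 := by
      have : (2 : Int) ^ (m - 2) < 2 ^ (m - 1) := by
        apply pow_lt_pow_right₀ (by norm_num); omega
      omega
    have hbl' : PySem.Int.bitLength (l - 1) = m - 1 := by
      apply bl_unique (l - 1) (m - 1) (by omega) ?_ (by omega)
      rw [show m - 1 - 1 = m - 2 from by omega]; exact hlow
    rw [binLength_pos (l - 1) (by omega), hbl',
      btb_char l (by omega) ((m - 1 : Nat) : Int) (by omega) (by omega)]
    rw [show ((m - 1 : Nat) : Int).toNat - 1 = m - 2 from by omega, hpw, hpow2,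
      Int.mul_ediv_cancel_left _ (by positivity : (2:Int) ^ (m - 2) ≠ 0)]
    decide

-- ===== VERDICT (by name: the statement is the Claim_ definition above) =====
theorem ListAppendElement_spec : Claim_equal_ListAppendElement := by
  intro l e _hdom
  unfold Spec_ListAppendElement
  simp only [ListAppendElement, ListAppendElement_alt]
  by_cases hl : 1 < l
  · rw [if_pos hl]
    by_cases hA : binTestBit l (binLength l) = 1 ∧ binTestBit l (binLength (l - 1)) = 0
    · have hBg : l = ((1 <<< (PySem.Int.bitLength l - 1) : Nat) : Int) := (guard_iff l hl).mp hA
      rw [if_pos hA, if_pos (And.intro hl hBg)]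
      have hsp : spreadLoop e 1 0 = Sfun e := by rw [spreadLoop_eq]; ring
      by_cases he : 0 < e
      · rw [binLength_pos e he, hsp]
        rw [show ((PySem.Int.bitLength e : Int)).toNat = PySem.Int.bitLength e from
          Int.toNat_natCast _]
        rw [afold e he (PySem.Int.bitLength e) le_rfl, Nat.sub_self, pow_zero, Int.ediv_one]
        have hNpos : 0 < 3 * Sfun e := by have := Sfun_pos e he; omega
        rw [if_neg (by omega : ¬ 3 * Sfun e = 0), if_neg (by omega : ¬ 3 * Sfun e = 0)]
        rw [binLength_pos _ hNpos, dfold, prodZ_eq, Int.shiftLeft_eq]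
        ring
      · have hsp0 : spreadLoop e 1 0 = 0 := by
          unfold spreadLoop; rw [if_neg he]
        rcases lt_or_eq_of_le (by omega : e ≤ 0) with hlt | heq
        · rw [binLength_neg e hlt, hsp0]
          rw [show ((0 : Int)).toNat = 0 from rfl, List.range_zero, List.foldl_nil, dfold]
          norm_num [prodZ_eq, Int.shiftLeft_eq]
          ring
        · subst heq
          have hb0 : binTestBit 0 1 = 0 := by
            unfold binTestBit binTestBitLoop; norm_num
          have hone : (1 : Int) - ((0 : Nat) : Int) = 1 := by norm_num
          have hp04 : prodZ 0 4 = 0 := by rw [prodZ_eq]; ring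
          rw [binLength_zero, hsp0, show ((1 : Int)).toNat = 1 from rfl, List.range_one,
            List.foldl_cons, List.foldl_nil, hone, hb0]
          norm_num [hp04]
          rw [dfold]
          norm_num [prodZ_eq, Int.shiftLeft_eq]
          ring
    · rw [if_neg hA, if_neg (fun hc => hA ((guard_iff l hl).mpr hc.2))]
  · rw [if_neg hl, if_neg (fun hc => hl hc.1)]
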